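-- pv_equiv track=rewrite | github.com/medatarun/medatarun | tools/database-baseline/src/database_baseline/utils/strip_simple_identifier_quotes.py | find_sql_text_literal_end
-- ===== SOURCE A (Python) =====
-- def find_sql_text_literal_end(sql: str, start_position: int) -> int:
--     """
--     Return the position just after the SQL text literal starting at `start_position`.
--
--     SQL escapes a single quote inside a text literal with doubled quotes (`''`), so this
--     scanner must skip those escape pairs instead of ending early.
--     """
--     literal_position = start_position + 1
--     while literal_position < len(sql):
--         if sql[literal_position] != "'":
--             literal_position = literal_position + 1
--             continue
--         next_position = literal_position + 1
--         if next_position < len(sql) and sql[next_position] == "'":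
--             literal_position = literal_position + 2
--             continue
--         return next_position
--     return len(sql)
-- ===== SOURCE B (Python) =====
-- def find_sql_text_literal_end(sql: str, start_position: int) -> int:
--     """Split the tail once on single quotes, then walk the parts list:
--     an SQL escape pair '' shows up as an empty part between two quotes."""
--     parts = sql[start_position + 1:].split("'")
--     pos = start_position + 1 + len(parts[0])
--     rest = parts[1:]
--     while rest:
--         if rest[0] == "" and len(rest) > 1:
--             pos += 2 + len(rest[1])
--             rest = rest[2:]
--         else:
--             return pos + 1
--     return len(sql)
-- ===== Notes on version B (the rewrite author's own statement) =====
-- stated objective: alternative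
-- what changed: Replaces the character-by-character scanning loop with a staged pass: split the tail once on single quotes and walk the resulting parts list, where an SQL escape pair '' appears as an empty part between two quotes.
-- outside the precondition, e.g. on find_sql_text_literal_end("'a", -2): A returns 1, B returns 2
import Mathlib
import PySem

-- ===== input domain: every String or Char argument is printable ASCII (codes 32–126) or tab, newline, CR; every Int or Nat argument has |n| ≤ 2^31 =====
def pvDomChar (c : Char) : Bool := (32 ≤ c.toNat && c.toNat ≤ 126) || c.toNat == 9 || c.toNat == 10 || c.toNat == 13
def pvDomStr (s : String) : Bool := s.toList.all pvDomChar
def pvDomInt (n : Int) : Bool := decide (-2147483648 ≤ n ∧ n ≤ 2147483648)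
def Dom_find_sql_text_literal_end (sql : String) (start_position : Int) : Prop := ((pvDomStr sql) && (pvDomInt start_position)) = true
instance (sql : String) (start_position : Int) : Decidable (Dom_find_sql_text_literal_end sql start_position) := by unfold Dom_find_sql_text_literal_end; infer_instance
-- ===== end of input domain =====

-- B replaces the character-by-character scan with a staged pass: split the tail once on "'"
-- and walk the resulting parts list (an SQL escape pair '' appears as an empty part);
-- return-value equivalence is proved on Pre_ below.

-- ===== PORT A =====
-- A's while-loop: literal_position advances by 1 (non-quote) or 2 (escape pair '').
def pvA_loop (cs : List Char) (lit : Int) : Int :=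
  if _h : lit < (cs.length : Int) then
    match _hg : PySem.List.pyGet? cs lit with
    | none => (cs.length : Int)   -- Python raises IndexError here (lit < -len); excluded by Pre_
    | some c =>
      if c ≠ '\'' then pvA_loop cs (lit + 1)
      else if (lit + 1 < (cs.length : Int)) ∧ PySem.List.pyGet? cs (lit + 1) = some '\'' then
        pvA_loop cs (lit + 2)
      else lit + 1
  else (cs.length : Int)
termination_by ((cs.length : Int) - lit).toNat
decreasing_by all_goals omega

def find_sql_text_literal_end (sql : String) (start_position : Int) : Int :=
  pvA_loop sql.toList (start_position + 1)

-- ===== PORT B =====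
-- B's while-loop over the parts list: rest[0] == "" with a following part is an escape pair.
def pvB_rest (n : Int) (pos : Int) (rest : List (List Char)) : Int :=
  match rest with
  | [] => n
  | [_r0] => pos + 1          -- len(rest) > 1 is false: return pos + 1
  | r0 :: r1 :: rt =>
    if r0 = [] then pvB_rest n (pos + 2 + (r1.length : Int)) rt   -- pos += 2 + len(rest[1]); rest = rest[2:]
    else pos + 1

def find_sql_text_literal_end_alt (sql : String) (start_position : Int) : Int :=
  let cs := sql.toList
  let parts := PySem.Chars.splitOn (PySem.List.slice cs (some (start_position + 1)) none) ['\'']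
  -- parts[0]: str.split never returns an empty list, so headD's default is never read
  let pos := start_position + 1 + ((parts.headD []).length : Int)
  pvB_rest (cs.length : Int) pos parts.tail

-- ===== PRECONDITION & SPEC =====
-- Pre_ excludes negative start_position: for start_position+1 < -len(sql) A raises IndexError
-- on its first subscript (B returns len(sql) there, via the clamped slice), and for -len(sql) <= start_position+1 < 0 A's value comes from Python's
-- negative-index wraparound — a corner no caller of this scanner (documented to receive the
-- opening quote's position) would specify, where B's slice-clamping value is equally defensible.
def Pre_find_sql_text_literal_end (sql : String) (start_position : Int) : Prop :=
  0 ≤ start_position + 1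
instance (sql : String) (start_position : Int) : Decidable (Pre_find_sql_text_literal_end sql start_position) := by unfold Pre_find_sql_text_literal_end; infer_instance

def pvWitness_find_sql_text_literal_end : String × Int := ("'it''s'", 0)

def Spec_find_sql_text_literal_end (sql : String) (start_position : Int) (out : Int) : Prop := out = find_sql_text_literal_end_alt sql start_position
instance (sql : String) (start_position : Int) (out : Int) : Decidable (Spec_find_sql_text_literal_end sql start_position out) := by unfold Spec_find_sql_text_literal_end; infer_instance

-- ===== CLAIM (what is proved, stated in full; the proofs are below) =====
def Claim_equal_find_sql_text_literal_end : Prop := ∀ (sql : String) (start_position : Int), Dom_find_sql_text_literal_end sql start_position → Pre_find_sql_text_literal_end sql start_position → Spec_find_sql_text_literal_end sql start_position (find_sql_text_literal_end sql start_position)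

-- ===== LEMMAS AND PROOFS =====

-- Clean structural characterization of str.split("'") used only by the proofs.
def pvSplitQ (t : List Char) : List (List Char) :=
  match t with
  | [] => [[]]
  | c :: u =>
    if c = '\'' then [] :: pvSplitQ u
    else
      match pvSplitQ u with
      | [] => [[c]]          -- unreachable: pvSplitQ is never []
      | p :: ps => (c :: p) :: ps

theorem pvSplitQ_ne_nil (t : List Char) : pvSplitQ t ≠ [] := by
  cases t with
  | nil => simp [pvSplitQ]
  | cons c u =>
    simp only [pvSplitQ]
    split_ifs
    · simp
    · cases h : pvSplitQ u <;> simp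

theorem pv_go_spec (l : List Char) : ∀ (fuel : Nat) (cur : List Char) (acc : List (List Char)),
    l.length ≤ fuel →
    PySem.Chars.splitOn.go ['\''] fuel l cur acc =
      acc.reverse ++ (cur.reverse ++ (pvSplitQ l).headD []) :: (pvSplitQ l).tail := by
  induction l with
  | nil =>
    intro fuel cur acc _
    cases fuel <;> simp [PySem.Chars.splitOn.go, pvSplitQ]
  | cons c t ih =>
    intro fuel cur acc hf
    cases fuel with
    | zero => simp at hf
    | succ f =>
      by_cases hc : c = '\''
      · subst hc
        rw [PySem.Chars.splitOn.go]
        simp only [List.isPrefixOf, beq_self_eq_true, Bool.true_and, if_pos]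
        rw [show List.drop ['\''].length ('\'' :: t) = t from rfl]
        rw [ih f [] (cur.reverse :: acc) (by simpa using hf)]
        rcases ht : pvSplitQ t with _ | ⟨p, ps⟩
        · exact absurd ht (pvSplitQ_ne_nil t)
        · simp [pvSplitQ, ht]
      · rw [PySem.Chars.splitOn.go]
        simp only [List.isPrefixOf, Bool.and_true]
        rw [if_neg (by simp [Ne.symm hc])]
        rw [ih f (c :: cur) acc (by simpa using hf)]
        rcases ht : pvSplitQ t with _ | ⟨p, ps⟩
        · exact absurd ht (pvSplitQ_ne_nil t)
        · simp [pvSplitQ, ht, hc]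

theorem pv_splitOn_quote (l : List Char) : PySem.Chars.splitOn l ['\''] = pvSplitQ l := by
  unfold PySem.Chars.splitOn
  rw [pv_go_spec l (l.length + 1) [] [] (by omega)]
  rcases ht : pvSplitQ l with _ | ⟨p, ps⟩
  · exact absurd ht (pvSplitQ_ne_nil l)
  · simp

-- A's scan marches over a quote-free stretch without changing the result.
theorem pvA_march (cs : List Char) (k r : Nat) (hkr : k ≤ r) (hr : r ≤ cs.length)
    (hq : ∀ j, k ≤ j → j < r → cs[j]? ≠ some '\'') :
    pvA_loop cs (k : Int) = pvA_loop cs (r : Int) := by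
  induction r, hkr using Nat.le_induction with
  | base => rfl
  | succ n hn ih =>
    have h1 : pvA_loop cs (k : Int) = pvA_loop cs (n : Int) :=
      ih (by omega) (fun j hj hjn => hq j hj (by omega))
    have hnl : (n : Int) < (cs.length : Int) := by exact_mod_cast by omega
    have hnl' : n < cs.length := by omega
    have hget : PySem.List.pyGet? cs (n : Int) = some cs[n] := by
      rw [PySem.List.pyGet?_natCast, List.getElem?_eq_getElem hnl']
    have hne : cs[n] ≠ '\'' := by
      intro h
      exact hq n hn (by omega) (by rw [List.getElem?_eq_getElem hnl', h])
    rw [h1, pvA_loop, dif_pos hnl, hget]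
    simp only [hne, ne_eq, not_false_eq_true, if_true]
    push_cast
    ring_nf

-- On a quote-free remainder A runs to the end of the string.
theorem pvA_none (cs : List Char) (k : Nat) (hk : k ≤ cs.length)
    (hq : ∀ j, k ≤ j → j < cs.length → cs[j]? ≠ some '\'') :
    pvA_loop cs (k : Int) = (cs.length : Int) := by
  rw [pvA_march cs k cs.length hk le_rfl hq, pvA_loop]
  rw [dif_neg (by omega)]

-- pvSplitQ of a quote-free list is that list alone.
theorem pvSplitQ_no_quote (t : List Char) (h : '\'' ∉ t) : pvSplitQ t = [t] := by
  induction t with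
  | nil => rfl
  | cons c u ih =>
    have hc : c ≠ '\'' := fun hc => h (hc ▸ List.mem_cons_self)
    have hu : pvSplitQ u = [u] := ih (fun hm => h (List.mem_cons_of_mem c hm))
    simp [pvSplitQ, hc, hu]

-- pvSplitQ peels a quote-free prefix up to the first quote.
theorem pvSplitQ_append (q u : List Char) (h : '\'' ∉ q) :
    pvSplitQ (q ++ '\'' :: u) = q :: pvSplitQ u := by
  induction q with
  | nil => simp [pvSplitQ]
  | cons c q' ih =>
    have hc : c ≠ '\'' := fun hc => h (hc ▸ List.mem_cons_self)
    have hq' : pvSplitQ (q' ++ '\'' :: u) = q' :: pvSplitQ u :=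
      ih (fun hm => h (List.mem_cons_of_mem c hm))
    simp [pvSplitQ, hc, hq']

-- B's composition after the first part, as the proofs see it.
def pvB_parts (n : Int) (k : Nat) (parts : List (List Char)) : Int :=
  pvB_rest n ((k : Int) + ((parts.headD []).length : Int)) parts.tail

-- Main loop correspondence: A from position k equals B's walk over split(cs.drop k).
theorem pv_main (cs : List Char) (m : Nat) : ∀ (k : Nat), k ≤ cs.length → cs.length - k ≤ m →
    pvA_loop cs (k : Int) = pvB_parts (cs.length : Int) k (pvSplitQ (cs.drop k)) := by
  induction m with
  | zero =>
    intro k hk hm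
    have hkl : cs.length ≤ k := by omega
    rw [List.drop_eq_nil_of_le hkl]
    rw [pvA_loop, dif_neg (by omega)]
    simp [pvB_parts, pvSplitQ, pvB_rest]
  | succ m ih =>
    intro k hk hm
    rcases hdc : (cs.drop k).dropWhile (fun c => c != '\'') with _ | ⟨c0, u⟩
    · -- no quote from k on: A runs to the end, B's parts list is [tail]
      have ht : cs.drop k = (cs.drop k).takeWhile (fun c => c != '\'') := by
        conv_lhs => rw [← List.takeWhile_append_dropWhile (p := fun c => c != '\'') (l := cs.drop k)]
        rw [hdc, List.append_nil]
      have hfree : '\'' ∉ cs.drop k := by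
        intro hmem
        have := List.mem_takeWhile_imp (ht ▸ hmem)
        simp at this
      have hqa : ∀ j, k ≤ j → j < cs.length → cs[j]? ≠ some '\'' := by
        intro j hj hjl hc
        have hj' : (cs.drop k)[j - k]? = some '\'' := by
          rw [List.getElem?_drop, show k + (j - k) = j from by omega, hc]
        exact hfree (List.mem_of_getElem? hj')
      rw [pvA_none cs k hk hqa, pvSplitQ_no_quote _ hfree]
      simp [pvB_parts, pvB_rest, List.length_drop]
    · -- first quote at r = k + q.length
      have hc0 : c0 = '\'' := by
        have hne : (cs.drop k).dropWhile (fun c => c != '\'') ≠ [] := by simp [hdc]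
        have := List.head_dropWhile_not (fun c => c != '\'') hne
        simpa [hdc] using this
      subst hc0
      set q := (cs.drop k).takeWhile (fun c => c != '\'') with hqdef
      have htqd : q ++ '\'' :: u = cs.drop k := by rw [← hdc, hqdef]; exact List.takeWhile_append_dropWhile
      have hfree : '\'' ∉ q := by
        intro hmem
        have := List.mem_takeWhile_imp (hqdef ▸ hmem)
        simp at this
      have hlen : cs.length - k = q.length + 1 + u.length := by
        have := congrArg List.length htqd
        simp [List.length_drop] at this
        omega
      have hr : k + q.length < cs.length := by omega
      -- A marches over q to the quote
      have hqa : ∀ j, k ≤ j → j < k + q.length → cs[j]? ≠ some '\'' := by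
        intro j hj hjl hc
        have hj' : (cs.drop k)[j - k]? = some '\'' := by
          rw [List.getElem?_drop, show k + (j - k) = j from by omega, hc]
        rw [← htqd] at hj'
        have hjq : j - k < q.length := by omega
        rw [List.getElem?_append_left hjq] at hj'
        exact hfree (by
          have := List.mem_of_getElem? hj'
          exact this)
      have hmarch := pvA_march cs k (k + q.length) (by omega) (by omega) hqa
      have hgetr : PySem.List.pyGet? cs ((k + q.length : Nat) : Int) = some '\'' := by
        rw [PySem.List.pyGet?_natCast, ← List.getElem?_drop, ← htqd]
        simp
      have hgetr1 : cs[k + q.length + 1]? = u[0]? := by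
        rw [show k + q.length + 1 = k + (q.length + 1) from by omega]
        rw [← List.getElem?_drop (i := k) (j := q.length + 1), ← htqd]
        rw [List.getElem?_append_right (by omega)]
        simp
      rw [hmarch, pvA_loop, dif_pos (by exact_mod_cast hr), hgetr]
      simp only [ne_eq, not_true_eq_false, if_false]
      rw [← htqd, pvSplitQ_append q u hfree]
      rcases huc : u with _ | ⟨c1, v⟩
      · -- closing quote is the last character
        subst huc
        simp only [List.length_nil] at hlen
        have hlen' : cs.length = k + q.length + 1 := by omega
        rw [if_neg (by
          intro hcontra
          have := hcontra.1
          omega)]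
        simp [pvSplitQ, pvB_parts, pvB_rest]
      · by_cases hc1 : c1 = '\''
        · -- escape pair: both skip it and continue
          subst hc1
          subst huc
          simp only [List.length_cons] at hlen
          have hget1 : PySem.List.pyGet? cs (((k + q.length : Nat) : Int) + 1) = some '\'' := by
            have : ((k + q.length : Nat) : Int) + 1 = ((k + q.length + 1 : Nat) : Int) := by push_cast; ring
            rw [this, PySem.List.pyGet?_natCast, hgetr1]
            rfl
          rw [if_pos ⟨by push_cast; omega, hget1⟩]
          have hdrop2 : cs.drop (k + q.length + 2) = v := by
            rw [show k + q.length + 2 = k + (q.length + 2) from by omega]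
            rw [← List.drop_drop (j := k) (i := q.length + 2) (l := cs), ← htqd]
            rw [List.drop_append]
            simp
          have hstep : ((k + q.length : Nat) : Int) + 2 = ((k + q.length + 2 : Nat) : Int) := by push_cast; ring
          rw [hstep, ih (k + q.length + 2) (by omega) (by omega), hdrop2]
          rcases hv : pvSplitQ v with _ | ⟨p, ps⟩
          · exact absurd hv (pvSplitQ_ne_nil v)
          · simp [pvSplitQ, pvB_parts, pvB_rest, hv]
        · -- unescaped quote: both return the position after it
          subst huc
          have hget1 : PySem.List.pyGet? cs (((k + q.length : Nat) : Int) + 1) = some c1 := by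
            have : ((k + q.length : Nat) : Int) + 1 = ((k + q.length + 1 : Nat) : Int) := by push_cast; ring
            rw [this, PySem.List.pyGet?_natCast, hgetr1]
            rfl
          rw [if_neg (by
            rintro ⟨-, hcontra⟩
            rw [hget1] at hcontra
            exact hc1 (by injection hcontra))]
          rcases hv : pvSplitQ v with _ | ⟨p, ps⟩
          · exact absurd hv (pvSplitQ_ne_nil v)
          · rcases ps with _ | ⟨p1, ps1⟩ <;>
              simp [pvSplitQ, pvB_parts, pvB_rest, hv, hc1]

-- ===== VERDICT (by name: the statement is the Claim_ definition above) =====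
theorem find_sql_text_literal_end_spec : Claim_equal_find_sql_text_literal_end := by
  intro sql sp _ hpre
  unfold Pre_find_sql_text_literal_end at hpre
  unfold Spec_find_sql_text_literal_end find_sql_text_literal_end find_sql_text_literal_end_alt
  simp only []
  have hk : sp + 1 = (((sp + 1).toNat : Nat) : Int) := by omega
  rw [hk, PySem.List.slice_from_natCast, pv_splitOn_quote]
  by_cases hkl : (sp + 1).toNat ≤ sql.toList.length
  · rw [pv_main sql.toList sql.toList.length (sp + 1).toNat hkl (by omega)]
    rfl
  · rw [List.drop_eq_nil_of_le (by omega)]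
    rw [pvA_loop, dif_neg (by omega)]
    simp [pvSplitQ, pvB_rest]
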